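-- pv_equiv track=rewrite | github.com/Skwangles/cryptography-enc-dec-and-crack | vigenere_cipher.py | get_english_frequency_match
-- ===== SOURCE A (Python) =====
-- ETAOIN = "ETAOINSHRDLCUMWFGYPBVKJXQZ"
--
-- ALPHABET = "ABCDEFGHIJKLMNOPQRSTUVWXYZ"
--
-- def get_english_frequency_match(text: str):
--     # Extract the six most and least common letters in ordered English frequency analysis
--     six_most_common_letters = ETAOIN[:6]
--     six_least_common_letters = ETAOIN[-6:]
--
--     frequency_letters_ordered = ""
--     frequencies = {
--         'A': 0, 'B': 0, 'C': 0, 'D': 0, 'E': 0,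
--         'F': 0, 'G': 0, 'H': 0, 'I': 0, 'J': 0,
--         'K': 0, 'L': 0, 'M': 0, 'N': 0, 'O': 0,
--         'P': 0, 'Q': 0, 'R': 0, 'S': 0, 'T': 0,
--         'U': 0, 'V': 0, 'W': 0, 'X': 0, 'Y': 0,
--         'Z': 0
--     }
--     dictionary = {}
--     match_count = 0
--
--     # Count number of times a letter occurs in a given text
--     for letter in text:
--         if letter in frequencies:
--             frequencies[letter] += 1
--
--     # Map the letter to frequency number
--     for letter in ALPHABET:
--         if frequencies[letter] not in dictionary:
--             dictionary[frequencies[letter]] = [letter]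
--         else:
--             dictionary[frequencies[letter]].append(letter)
--
--     # Join letters with the same frequency number
--     for frequency in dictionary:
--         dictionary[frequency].sort(key=ETAOIN.find, reverse=True)
--         dictionary[frequency] = "".join(dictionary[frequency])
--
--     # Sort the list in order of most frequent to least frequent
--     frequency_pairs = list(dictionary.items())
--     frequency_pairs.sort(reverse=True)
--
--     # Convert frequency list into a string
--     for frequency in frequency_pairs:
--         frequency_letters_ordered += frequency[1]
--
--     # Count number of times the six most common letters are in the six most frequent letters in a given text
--     for letter in six_most_common_letters:
--         if letter in frequency_letters_ordered[:6]:
--             match_count += 1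
--
--     # Count number of times the six least common letters are in the six least frequent letters in a given text
--     for letter in six_least_common_letters:
--         if letter in frequency_letters_ordered[-6:]:
--             match_count += 1
--     return match_count
-- ===== SOURCE B (Python) =====
-- ETAOIN = "ETAOINSHRDLCUMWFGYPBVKJXQZ"
--
-- ALPHABET = "ABCDEFGHIJKLMNOPQRSTUVWXYZ"
--
-- def get_english_frequency_match(text: str):
--     # One direct sort of the 26 letters by (frequency, ETAOIN position), both descending,
--     # replaces A's frequency-bucket dictionary, per-bucket sort and bucket sort.
--     ordered = sorted(ALPHABET, key=lambda c: (text.count(c), ETAOIN.find(c)), reverse=True)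
--     return (sum(c in ordered[:6] for c in ETAOIN[:6])
--             + sum(c in ordered[-6:] for c in ETAOIN[-6:]))
-- ===== Notes on version B (the rewrite author's own statement) =====
-- stated objective: simpler
-- what changed: Replaces A's frequency-keyed bucket dictionary, per-bucket sort and bucket-pair sort with one direct sort of the 26 letters by the tuple key (text.count(c), ETAOIN.find(c)) descending, and folds the two tally loops into two sum() expressions.
import Mathlib
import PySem

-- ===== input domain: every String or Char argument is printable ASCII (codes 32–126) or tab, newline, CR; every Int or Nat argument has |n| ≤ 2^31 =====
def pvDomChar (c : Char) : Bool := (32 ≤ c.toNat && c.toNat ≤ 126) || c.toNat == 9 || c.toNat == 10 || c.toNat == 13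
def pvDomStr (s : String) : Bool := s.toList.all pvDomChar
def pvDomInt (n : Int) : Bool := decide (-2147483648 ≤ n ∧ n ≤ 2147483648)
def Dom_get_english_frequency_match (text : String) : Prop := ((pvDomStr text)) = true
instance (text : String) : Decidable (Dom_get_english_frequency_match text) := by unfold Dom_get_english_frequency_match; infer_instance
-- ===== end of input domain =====

-- B replaces A's frequency-bucket dictionary, per-bucket sort and bucket-pair sort by ONE direct
-- sort of the 26 letters under the tuple key (count, ETAOIN index), both descending (objective: simpler).

-- ===== PORT A =====
def pvETAOIN : List Char := "ETAOINSHRDLCUMWFGYPBVKJXQZ".toList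
def pvALPHABET : List Char := "ABCDEFGHIJKLMNOPQRSTUVWXYZ".toList

def pvFreqInit : PySem.Dict Char Int := PySem.Dict.ofList
  [('A',0),('B',0),('C',0),('D',0),('E',0),('F',0),('G',0),('H',0),('I',0),('J',0),
   ('K',0),('L',0),('M',0),('N',0),('O',0),('P',0),('Q',0),('R',0),('S',0),('T',0),
   ('U',0),('V',0),('W',0),('X',0),('Y',0),('Z',0)]

-- literal transliteration of A; Python's per-frequency bucket is a list of 1-char strings later
-- joined to a str — both are represented as List Char (exact: only single letters are stored).
def get_english_frequency_match (text : String) : Int :=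
  let six_most_common_letters := PySem.List.slice pvETAOIN none (some 6)
  let six_least_common_letters := PySem.List.slice pvETAOIN (some (-6)) none
  -- for letter in text: if letter in frequencies: frequencies[letter] += 1
  let frequencies := text.toList.foldl (fun d letter =>
      if d.contains letter then d.insert letter (d.getD letter 0 + 1) else d) pvFreqInit
  -- for letter in ALPHABET: bucket dictionary keyed by frequency
  -- (frequencies[letter] is read via getD 0: exact, the key is always present)
  let dictionary := pvALPHABET.foldl (fun d letter =>
      if !(d.contains (frequencies.getD letter 0)) then d.insert (frequencies.getD letter 0) [letter]
      else d.modify (frequencies.getD letter 0) [] (fun b => b ++ [letter]))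
    (PySem.Dict.empty : PySem.Dict Int (List Char))
  -- for frequency in dictionary: sort bucket by ETAOIN.find, reverse=True (''.join is the identity here)
  let dictionary := dictionary.keys.foldl (fun d frequency =>
      d.modify frequency [] (fun b => PySem.List.sorted b (fun c => PySem.Chars.find pvETAOIN [c]) true)) dictionary
  -- frequency_pairs = list(dictionary.items()); frequency_pairs.sort(reverse=True)  (tuple compare)
  let frequency_pairs := PySem.List.sorted2 dictionary.items (fun p => p.1) (fun p => p.2) true
  let frequency_letters_ordered := frequency_pairs.foldl (fun acc p => acc ++ p.2) ([] : List Char)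
  let match_count := six_most_common_letters.foldl (fun m letter =>
      if PySem.Chars.isIn [letter] (PySem.List.slice frequency_letters_ordered none (some 6)) then m + 1 else m) (0 : Int)
  let match_count := six_least_common_letters.foldl (fun m letter =>
      if PySem.Chars.isIn [letter] (PySem.List.slice frequency_letters_ordered (some (-6)) none) then m + 1 else m) match_count
  match_count

-- ===== PORT B =====
-- ordered = sorted(ALPHABET, key=lambda c: (text.count(c), ETAOIN.find(c)), reverse=True)
-- return sum(c in ordered[:6] for c in ETAOIN[:6]) + sum(c in ordered[-6:] for c in ETAOIN[-6:])
def get_english_frequency_match_alt (text : String) : Int :=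
  let ordered := PySem.List.sorted2 pvALPHABET
      (fun c => (PySem.Chars.count text.toList [c] : Int))
      (fun c => PySem.Chars.find pvETAOIN [c]) true
  ((PySem.List.slice pvETAOIN none (some 6)).map (fun c =>
      if (PySem.List.slice ordered none (some 6)).contains c then (1 : Int) else 0)).sum
  + ((PySem.List.slice pvETAOIN (some (-6)) none).map (fun c =>
      if (PySem.List.slice ordered (some (-6)) none).contains c then (1 : Int) else 0)).sum

-- ===== PRECONDITION & SPEC =====
def Spec_get_english_frequency_match (text : String) (out : Int) : Prop := out = get_english_frequency_match_alt text
instance (text : String) (out : Int) : Decidable (Spec_get_english_frequency_match text out) := by unfold Spec_get_english_frequency_match; infer_instance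

-- ===== CLAIM (what is proved, stated in full; the proofs are below) =====
def Claim_equal_get_english_frequency_match : Prop := ∀ (text : String), Dom_get_english_frequency_match text → Spec_get_english_frequency_match text (get_english_frequency_match text)

-- ===== LEMMAS AND PROOFS =====

-- str.count with a single-character needle is character count
theorem pv_count_go_singleton (c : Char) (fuel : Nat) (l : List Char) (acc : Nat)
    (h : l.length ≤ fuel) : PySem.Chars.count.go [c] fuel l acc = acc + l.count c := by
  induction fuel generalizing l acc with
  | zero => cases l with
    | nil => simp [PySem.Chars.count.go]
    | cons a t => simp at h
  | succ n ih => cases l with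
    | nil => simp [PySem.Chars.count.go]
    | cons a t =>
      simp only [List.length_cons, Nat.succ_le_succ_iff] at h
      rw [PySem.Chars.count.go]
      by_cases hc : c = a
      · subst hc
        simp [List.isPrefixOf, ih _ _ h]
        omega
      · simp [List.isPrefixOf, Ne.symm hc, hc, ih _ _ h]

theorem pv_count_singleton (cs : List Char) (c : Char) :
    PySem.Chars.count cs [c] = cs.count c := by
  simp [PySem.Chars.count, pv_count_go_singleton c cs.length cs 0 le_rfl]

-- the frequency-counting loop: counts accumulate on the existing keys
theorem pv_freq_getD (l : List Char) (d : PySem.Dict Char Int) (x : Char)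
    (hx : d.contains x = true) :
    (l.foldl (fun d letter =>
      if d.contains letter then d.insert letter (d.getD letter 0 + 1) else d) d).getD x 0
      = d.getD x 0 + l.count x := by
  induction l generalizing d with
  | nil => simp
  | cons a t ih =>
    simp only [List.foldl_cons]
    by_cases ha : d.contains a
    · rw [if_pos ha, ih _ (by simp [PySem.Dict.contains_insert, hx])]
      by_cases hax : x = a
      · subst hax; simp [PySem.Dict.getD_insert_self]; ring
      · rw [PySem.Dict.getD_insert_of_ne _ _ _ hax]
        simp [Ne.symm hax]
    · rw [if_neg ha, ih _ hx]
      have hax : x ≠ a := by rintro rfl; rw [hx] at ha; exact ha rfl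
      simp [Ne.symm hax]

-- the initial 26-key dictionary: its key set is the alphabet, all values are 0
theorem pv_init_eq : pvFreqInit = ({ items :=
  [('A',0),('B',0),('C',0),('D',0),('E',0),('F',0),('G',0),('H',0),('I',0),('J',0),
   ('K',0),('L',0),('M',0),('N',0),('O',0),('P',0),('Q',0),('R',0),('S',0),('T',0),
   ('U',0),('V',0),('W',0),('X',0),('Y',0),('Z',0)] } : PySem.Dict Char Int) := by decide

set_option maxHeartbeats 2000000 in
theorem pv_init_contains (c : Char) : pvFreqInit.contains c = pvALPHABET.contains c := by
  rw [pv_init_eq, PySem.Dict.contains_mk, Bool.eq_iff_iff]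
  have h : pvALPHABET = ['A','B','C','D','E','F','G','H','I','J','K','L','M','N','O','P','Q','R','S','T','U','V','W','X','Y','Z'] := by decide
  rw [h]
  simp [List.contains_eq_mem]
  tauto

theorem pv_getD_zero_of_all_zero (c : Char) (ps : List (Char × Int)) (h : ∀ p ∈ ps, p.2 = 0) :
    (PySem.Dict.mk ps).getD c 0 = 0 := by
  induction ps with
  | nil => rfl
  | cons a t ih =>
    rw [show PySem.Dict.mk (a :: t) = PySem.Dict.mk ((a.1, a.2) :: t) by rfl]
    simp only [PySem.Dict.getD, PySem.Dict.get?_mk_cons] at ih ⊢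
    by_cases hc : a.1 == c
    · simp [hc, h a (by simp)]
    · simp only [hc, Bool.false_eq_true, if_false]
      exact ih (fun p hp => h p (by simp [hp]))

theorem pv_init_getD (c : Char) : pvFreqInit.getD c 0 = 0 := by
  rw [pv_init_eq]
  exact pv_getD_zero_of_all_zero c _ (by decide)

-- the bucket-building loop, for an abstract key function g
theorem pv_bucket_keys (g : Char → Int) (l : List Char) (d : PySem.Dict Int (List Char)) :
    (l.foldl (fun d letter =>
      if !(d.contains (g letter)) then d.insert (g letter) [letter]
      else d.modify (g letter) [] (fun b => b ++ [letter])) d).keys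
      = PySem.Set.update d.keys (l.map g) := by
  induction l generalizing d with
  | nil => simp [PySem.Set.update]
  | cons a t ih =>
    simp only [List.foldl_cons, List.map_cons, PySem.Set.update, ih]
    congr 1
    by_cases h : d.contains (g a)
    · rw [if_neg (by simp [h]), PySem.Dict.modify, PySem.Dict.keys_insert_of_contains _ _ h,
        PySem.Set.add_of_mem ((PySem.Dict.contains_iff_mem_keys _ _).mp h)]
    · rw [if_pos (by simp [h]), PySem.Dict.keys_insert_of_not_contains _ _ (by simp [h]),
        PySem.Set.add_of_not_mem (fun hm => by simp [(PySem.Dict.contains_iff_mem_keys _ _).mpr hm] at h)]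

theorem pv_getD_not_contains {d : PySem.Dict Int (List Char)} {v : Int}
    (h : d.contains v = false) : d.getD v [] = [] := by
  simp [PySem.Dict.getD, (PySem.Dict.get?_eq_none_iff_contains _ _).mpr h]

theorem pv_bucket_getD (g : Char → Int) (l : List Char) (d : PySem.Dict Int (List Char)) (v : Int) :
    (l.foldl (fun d letter =>
      if !(d.contains (g letter)) then d.insert (g letter) [letter]
      else d.modify (g letter) [] (fun b => b ++ [letter])) d).getD v []
      = d.getD v [] ++ l.filter (fun c => g c == v) := by
  induction l generalizing d with
  | nil => simp
  | cons a t ih =>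
    simp only [List.foldl_cons, ih, List.filter_cons]
    by_cases hv : g a = v
    · subst hv
      simp only [beq_self_eq_true, if_pos]
      by_cases h : d.contains (g a)
      · rw [if_neg (by simp [h]), PySem.Dict.getD_modify_self]; simp
      · rw [if_pos (by simp [h]), PySem.Dict.getD_insert_self, pv_getD_not_contains (by simp [h])]
        simp
    · have hb : (g a == v) = false := by simp [hv]
      simp only [hb, Bool.false_eq_true, if_false]
      by_cases h : d.contains (g a)
      · rw [if_neg (by simp [h]), PySem.Dict.modify, PySem.Dict.getD_insert_of_ne _ _ _ (Ne.symm hv)]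
      · rw [if_pos (by simp [h]), PySem.Dict.getD_insert_of_ne _ _ _ (Ne.symm hv)]

-- the per-bucket sorting loop over a Nodup key list
theorem pv_sortloop_getD (g : List Char → List Char) (ks : List Int)
    (hnd : ks.Nodup) (d : PySem.Dict Int (List Char)) (v : Int) :
    (ks.foldl (fun d k => d.modify k [] g) d).getD v []
      = if v ∈ ks then g (d.getD v []) else d.getD v [] := by
  induction ks generalizing d with
  | nil => simp
  | cons a t ih =>
    simp only [List.foldl_cons, List.nodup_cons] at *
    rw [ih hnd.2]
    by_cases hv : v = a
    · subst hv
      simp [hnd.1, PySem.Dict.getD_modify_self]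
    · rw [PySem.Dict.getD_modify_of_ne _ _ _ hv]
      simp [hv]

theorem pv_set_update_self (s : PySem.Set Int) (xs : List Int) (h : ∀ x ∈ xs, x ∈ s) :
    PySem.Set.update s xs = s := by
  induction xs generalizing s with
  | nil => rfl
  | cons a t ih =>
    simp only [PySem.Set.update, List.foldl_cons] at *
    rw [PySem.Set.add_of_mem (h a (by simp))]
    exact ih s (fun x hx => h x (by simp [hx]))

-- Python's tuple-key sort is the sort under the lexicographic key
theorem pv_sorted2_eq_sorted_lex {α κ₁ κ₂ : Type} [LinearOrder κ₁] [LinearOrder κ₂]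
    (xs : List α) (k1 : α → κ₁) (k2 : α → κ₂) (rev : Bool) :
    PySem.List.sorted2 xs k1 k2 rev
      = PySem.List.sorted xs (fun x => toLex (k1 x, k2 x)) rev := by
  have hlt : ∀ a b : α, (decide (k1 a < k1 b) || (!decide (k1 b < k1 a) && decide (k2 a < k2 b)))
      = decide ((toLex (k1 a, k2 a) : Lex (κ₁ × κ₂)) < toLex (k1 b, k2 b)) := by
    intro a b
    rcases lt_trichotomy (k1 a) (k1 b) with h | h | h
    · simp [h, Prod.Lex.lt_iff]
    · simp [Prod.Lex.lt_iff, h]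
    · simp [Prod.Lex.lt_iff, asymm h, h, ne_of_gt h]
  have h1 : (fun a b : α => decide (k1 a < k1 b) || (!decide (k1 b < k1 a) && decide (k2 a < k2 b)))
      = fun a b => decide ((toLex (k1 a, k2 a) : Lex (κ₁ × κ₂)) < toLex (k1 b, k2 b)) :=
    funext fun a => funext fun b => hlt a b
  have h2 : (fun a b : α => decide (k1 b < k1 a) || (!decide (k1 a < k1 b) && decide (k2 b < k2 a)))
      = fun a b => decide ((toLex (k1 b, k2 b) : Lex (κ₁ × κ₂)) < toLex (k1 a, k2 a)) :=
    funext fun a => funext fun b => hlt b a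
  unfold PySem.List.sorted2 PySem.List.sorted
  cases rev <;> simp only [Bool.false_eq_true, if_false, if_true, h1, h2]

-- a strictly key-descending rearrangement IS sorted(xs, key=(k1,k2), reverse=True)
theorem pv_sorted2_rev_eq {α κ₁ κ₂ : Type} [LinearOrder κ₁] [LinearOrder κ₂]
    (xs ys : List α) (k1 : α → κ₁) (k2 : α → κ₂)
    (hperm : ys.Perm xs)
    (hpair : ys.Pairwise (fun a b => k1 b < k1 a ∨ (k1 b = k1 a ∧ k2 b < k2 a))) :
    PySem.List.sorted2 xs k1 k2 true = ys := by
  rw [pv_sorted2_eq_sorted_lex]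
  exact PySem.List.sorted_rev_eq_of_perm_of_pairwise_gt xs ys _ hperm
    (hpair.imp (fun {a b} h => by
      rw [Prod.Lex.lt_iff]; simpa using h))

-- membership of a single-character needle is list membership
theorem pv_isIn_singleton (c : Char) (l : List Char) :
    PySem.Chars.isIn [c] l = l.contains c := by
  rw [Bool.eq_iff_iff, PySem.Chars.isIn_iff_infix, List.contains_eq_mem,
    List.singleton_infix_iff]
  simp

theorem pv_sum_single (f : Char → Int) (c : Char) (n : Nat) (vs : List Int)
    (hnd : vs.Nodup) (hm : f c ∈ vs) :
    ((vs.map (fun v => if f c == v then n else 0)).sum) = n := by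
  induction vs with
  | nil => simp at hm
  | cons a t ih =>
    simp only [List.nodup_cons] at hnd
    simp only [List.map_cons, List.sum_cons]
    by_cases h : f c = a
    · subst h
      have hz : ∀ x ∈ t.map (fun v => if f c == v then n else 0), x = 0 := by
        intro x hx
        simp only [List.mem_map] at hx
        obtain ⟨v, hv, rfl⟩ := hx
        have : f c ≠ v := fun he => hnd.1 (he ▸ hv)
        simp [this]
      rw [List.sum_eq_zero hz]
      simp
    · have hm' : f c ∈ t := by rcases List.mem_cons.mp hm with h' | h'; exact absurd h' h; exact h'
      have hb : (f c == a) = false := by simp [h]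
      rw [hb, ih hnd.2 hm']
      simp

-- flattening the buckets over the distinct key values recovers a permutation of the list
theorem pv_flatten_buckets_perm (f : Char → Int) (l : List Char) :
    ((PySem.Set.ofList (l.map f)).map (fun v => l.filter (fun c => f c == v))).flatten.Perm l := by
  rw [List.perm_iff_count]
  intro a
  rw [List.count_flatten, List.map_map]
  by_cases hm : a ∈ l
  · have h1 : ∀ v ∈ PySem.Set.ofList (l.map f),
        (l.filter (fun c => f c == v)).count a = if f a == v then l.count a else 0 := by
      intro v _
      by_cases hv : f a = v
      · simp only [hv, beq_self_eq_true, if_pos]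
        exact List.count_filter (by simp [hv])
      · have : (f a == v) = false := by simp [hv]
        rw [this]
        simp only [Bool.false_eq_true, if_false]
        rw [List.count_eq_zero]
        intro hmem
        exact hv (by simpa using (List.mem_filter.mp hmem).2)
    simp only [Function.comp_def]
    rw [List.map_congr_left h1]
    exact pv_sum_single f a (l.count a) _ (PySem.Set.nodup_ofList _)
      ((PySem.Set.mem_ofList _ _).mpr (List.mem_map_of_mem hm))
  · rw [List.count_eq_zero.mpr hm]
    apply List.sum_eq_zero
    intro x hx
    simp only [List.mem_map, Function.comp] at hx
    obtain ⟨v, _, rfl⟩ := hx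
    rw [List.count_eq_zero]
    intro hmem
    exact hm (List.mem_of_mem_filter hmem)

theorem pv_flatten_perm_congr (L : List Int) (g₁ g₂ : Int → List Char)
    (h : ∀ x ∈ L, (g₁ x).Perm (g₂ x)) :
    ((L.map g₁).flatten).Perm ((L.map g₂).flatten) := by
  induction L with
  | nil => rfl
  | cons a t ih =>
    simp only [List.map_cons, List.flatten_cons]
    exact (h a (by simp)).append (ih (fun x hx => h x (by simp [hx])))

-- ETAOIN.find is injective on the alphabet
theorem pv_find_nodup : (pvALPHABET.map (fun a => PySem.Chars.find pvETAOIN [a])).Nodup := by decide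

theorem pv_find_inj : ∀ a ∈ pvALPHABET, ∀ b ∈ pvALPHABET,
    PySem.Chars.find pvETAOIN [a] = PySem.Chars.find pvETAOIN [b] → a = b :=
  List.inj_on_of_nodup_map pv_find_nodup

theorem pv_alpha_nodup : pvALPHABET.Nodup := by decide

-- pairwise shape of the tuple-key reverse sort, via the insertion-sort structure
theorem pv_insertBy_pairwise {α : Type} (before : α → α → Bool)
    (hasym : ∀ a b, before a b = true → before b a = false)
    (htrans : ∀ a b c, before b a = false → before c b = false → before c a = false)
    (x : α) (ys : List α) (h : ys.Pairwise (fun a b => before b a = false)) :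
    (PySem.List.insertBy before x ys).Pairwise (fun a b => before b a = false) := by
  induction ys with
  | nil => simp [PySem.List.insertBy]
  | cons y t ih =>
    rw [PySem.List.insertBy]
    rcases List.pairwise_cons.mp h with ⟨hy, ht⟩
    by_cases hb : before x y
    · rw [if_pos hb]
      refine List.pairwise_cons.mpr ⟨?_, h⟩
      intro z hz
      rcases List.mem_cons.mp hz with rfl | hzt
      · exact hasym x z hb
      · exact htrans x y z (hasym x y hb) (hy z hzt)
    · rw [if_neg hb]
      refine List.pairwise_cons.mpr ⟨?_, ih ht⟩
      intro z hz
      rcases (PySem.List.mem_insertBy before x z t).mp hz with rfl | hzt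
      · simpa using hb
      · exact hy z hzt

theorem pv_foldl_insertBy_pairwise {α : Type} (before : α → α → Bool)
    (hasym : ∀ a b, before a b = true → before b a = false)
    (htrans : ∀ a b c, before b a = false → before c b = false → before c a = false)
    (xs acc : List α) (hacc : acc.Pairwise (fun a b => before b a = false)) :
    (xs.foldl (fun acc x => PySem.List.insertBy before x acc) acc).Pairwise
      (fun a b => before b a = false) := by
  induction xs generalizing acc with
  | nil => exact hacc
  | cons x t ih =>
    exact ih _ (pv_insertBy_pairwise before hasym htrans x acc hacc)

theorem pv_pairs_pairwise (xs : List (Int × List Char)) :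
    (PySem.List.sorted2 xs (fun p => p.1) (fun p => p.2) true).Pairwise
      (fun p q => ¬ p.1 < q.1 ∧ (q.1 < p.1 ∨ ¬ p.2 < q.2)) := by
  unfold PySem.List.sorted2
  simp only [if_true]
  refine List.Pairwise.imp ?_ (pv_foldl_insertBy_pairwise _ ?_ ?_ xs [] (by simp))
  · intro a b hab
    simpa only [Bool.or_eq_false_iff, Bool.and_eq_false_iff, Bool.not_eq_false',
      decide_eq_false_iff_not, decide_eq_true_eq] using hab
  · intro a b hab
    simp only [Bool.or_eq_true, Bool.and_eq_true, Bool.not_eq_true', decide_eq_true_eq,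
      decide_eq_false_iff_not] at hab
    simp only [Bool.or_eq_false_iff, Bool.and_eq_false_iff, Bool.not_eq_false',
      decide_eq_false_iff_not, decide_eq_true_eq]
    rcases hab with h | ⟨h1, h2⟩
    · exact ⟨lt_asymm h, Or.inl h⟩
    · exact ⟨h1, Or.inr (lt_asymm h2)⟩
  · intro a b c h1 h2
    simp only [Bool.or_eq_false_iff, Bool.and_eq_false_iff, Bool.not_eq_false',
      decide_eq_false_iff_not, decide_eq_true_eq] at h1 h2 ⊢
    obtain ⟨hab1, hab2⟩ := h1
    obtain ⟨hbc1, hbc2⟩ := h2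
    have hba : b.1 ≤ a.1 := not_lt.mp hab1
    have hcb : c.1 ≤ b.1 := not_lt.mp hbc1
    refine ⟨not_lt.mpr (hcb.trans hba), ?_⟩
    rcases hab2 with h | h
    · exact Or.inl (lt_of_le_of_lt hcb h)
    · rcases hbc2 with h' | h'
      · exact Or.inl (lt_of_lt_of_le h' hba)
      · exact Or.inr (not_lt.mpr ((not_lt.mp h').trans (not_lt.mp h)))

set_option maxHeartbeats 2000000 in
theorem pv_ordered_eq (text : String) :
    (let frequencies := text.toList.foldl (fun d letter =>
        if d.contains letter then d.insert letter (d.getD letter 0 + 1) else d) pvFreqInit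
     let dictionary := pvALPHABET.foldl (fun d letter =>
        if !(d.contains (frequencies.getD letter 0)) then d.insert (frequencies.getD letter 0) [letter]
        else d.modify (frequencies.getD letter 0) [] (fun b => b ++ [letter]))
      (PySem.Dict.empty : PySem.Dict Int (List Char))
     let dictionary := dictionary.keys.foldl (fun d frequency =>
        d.modify frequency [] (fun b => PySem.List.sorted b (fun c => PySem.Chars.find pvETAOIN [c]) true)) dictionary
     let frequency_pairs := PySem.List.sorted2 dictionary.items (fun p => p.1) (fun p => p.2) true
     frequency_pairs.foldl (fun acc p => acc ++ p.2) ([] : List Char))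
    = PySem.List.sorted2 pvALPHABET
        (fun c => ((text.toList.count c : Nat) : Int))
        (fun c => PySem.Chars.find pvETAOIN [c]) true := by
  dsimp only
  -- names for the pieces
  set f : Char → Int := fun c => ((text.toList.count c : Nat) : Int) with hf
  set idx : Char → Int := fun c => PySem.Chars.find pvETAOIN [c] with hidx
  set freqd := text.toList.foldl (fun d letter =>
      if d.contains letter then d.insert letter (d.getD letter 0 + 1) else d) pvFreqInit with hfreqd
  have hfreqget : ∀ c ∈ pvALPHABET, freqd.getD c 0 = f c := by
    intro c hc
    have hcont : pvFreqInit.contains c = true := by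
      rw [pv_init_contains]; simpa [List.contains_eq_mem] using hc
    rw [hfreqd, pv_freq_getD _ _ _ hcont, pv_init_getD, hf]
    simp
  -- replace the dictionary lookups in the bucket loop by the count function f
  rw [PySem.List.foldl_congr_mem pvALPHABET _
    (fun d letter => if !(d.contains (f letter)) then d.insert (f letter) [letter]
      else d.modify (f letter) [] (fun b => b ++ [letter])) PySem.Dict.empty
    (fun acc x hx => by rw [hfreqget x hx])]
  set d1 := pvALPHABET.foldl (fun d letter =>
      if !(d.contains (f letter)) then d.insert (f letter) [letter]
      else d.modify (f letter) [] (fun b => b ++ [letter])) PySem.Dict.empty with hd1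
  have hkeys1 : d1.keys = PySem.Set.ofList (pvALPHABET.map f) := by
    rw [hd1, pv_bucket_keys, PySem.Dict.keys_empty, PySem.Set.ofList_eq_foldl]
    rfl
  have hnd1 : d1.keys.Nodup := by rw [hkeys1]; exact PySem.Set.nodup_ofList _
  have hget1 : ∀ v, d1.getD v [] = pvALPHABET.filter (fun c => f c == v) := by
    intro v
    rw [hd1, pv_bucket_getD, PySem.Dict.getD_empty]
    rfl
  set sg : List Char → List Char := fun b => PySem.List.sorted b idx true with hsg
  set d2 := d1.keys.foldl (fun d k => d.modify k [] sg) d1 with hd2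
  have hkeys2 : d2.keys = d1.keys := by
    rw [hd2, PySem.Dict.keys_foldl_modify]
    exact pv_set_update_self _ _ (fun x hx => hx)
  have hnd2 : d2.keys.Nodup := by rw [hkeys2]; exact hnd1
  have hitems : d2.items = d1.keys.map (fun v => (v, sg (pvALPHABET.filter (fun c => f c == v)))) := by
    rw [PySem.Dict.items_eq_map_keys d2 hnd2 [], hkeys2]
    refine List.map_congr_left (fun v hv => ?_)
    rw [hd2, pv_sortloop_getD sg d1.keys hnd1 d1 v, if_pos hv, hget1 v]
  set pairs := PySem.List.sorted2 d2.items (fun p => p.1) (fun p => p.2) true with hpairs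
  have hp0 : pairs.Perm d2.items := PySem.List.sorted2_perm _ _ _ _
  -- every pair is a (value, sorted bucket) pair
  have hformP : ∀ p ∈ pairs, p.1 ∈ d1.keys ∧ p.2 = sg (pvALPHABET.filter (fun c => f c == p.1)) := by
    intro p hp
    have hpi : p ∈ d2.items := hp0.mem_iff.mp hp
    rw [hitems] at hpi
    obtain ⟨v, hv, rfl⟩ := List.mem_map.mp hpi
    exact ⟨hv, rfl⟩
  have hmemb : ∀ p ∈ pairs, ∀ a ∈ p.2, a ∈ pvALPHABET ∧ f a = p.1 := by
    intro p hp a ha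
    rw [(hformP p hp).2, hsg, PySem.List.mem_sorted] at ha
    have := List.mem_filter.mp ha
    exact ⟨this.1, by simpa using this.2⟩
  rw [PySem.List.foldl_append_eq_flatMap (fun p => p.2) pairs []]
  rw [List.nil_append]
  refine (pv_sorted2_rev_eq pvALPHABET _ f idx ?_ ?_).symm
  · -- permutation
    rw [List.flatMap_def]
    have h1 : (pairs.map (fun p : Int × List Char => p.2)).flatten.Perm
        ((d2.items.map (fun p : Int × List Char => p.2)).flatten) :=
      (hp0.map _).flatten
    have h2 : (d2.items.map (fun p : Int × List Char => p.2))
        = d1.keys.map (fun v => sg (pvALPHABET.filter (fun c => f c == v))) := by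
      rw [hitems, List.map_map]; rfl
    rw [h2] at h1
    have h3 : ((d1.keys.map (fun v => sg (pvALPHABET.filter (fun c => f c == v)))).flatten).Perm
        ((d1.keys.map (fun v => pvALPHABET.filter (fun c => f c == v))).flatten) :=
      pv_flatten_perm_congr _ _ _ (fun v _ => PySem.List.sorted_perm _ _ _)
    have h4 : ((d1.keys.map (fun v => pvALPHABET.filter (fun c => f c == v))).flatten).Perm pvALPHABET := by
      rw [hkeys1]; exact pv_flatten_buckets_perm f pvALPHABET
    exact h1.trans (h3.trans h4)
  · -- pairwise strictly descending under (f, idx)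
    rw [List.flatMap_def, List.pairwise_flatten]
    constructor
    · intro l' hl'
      obtain ⟨p, hp, rfl⟩ := List.mem_map.mp hl'
      have hpair : (p.2).Pairwise (fun a b => idx b ≤ idx a) := by
        rw [(hformP p hp).2, hsg]
        exact PySem.List.sorted_pairwise_rev _ _
      have hnd : (p.2).Nodup := by
        rw [(hformP p hp).2, hsg]
        exact ((PySem.List.sorted_perm _ _ _).nodup_iff).mpr (pv_alpha_nodup.filter _)
      refine (hpair.and hnd).imp_of_mem (fun {a b} ha hb hab => ?_)
      obtain ⟨haA, hfa⟩ := hmemb p hp a ha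
      obtain ⟨hbA, hfb⟩ := hmemb p hp b hb
      refine Or.inr ⟨hfb.trans hfa.symm, lt_of_le_of_ne hab.1 (fun he => hab.2 ?_)⟩
      exact (pv_find_inj b hbA a haA he).symm ▸ rfl
    · rw [List.pairwise_map]
      have hpl : pairs.Pairwise (fun p q => ¬ p.1 < q.1 ∧ (q.1 < p.1 ∨ ¬ p.2 < q.2)) := by
        rw [hpairs]; exact pv_pairs_pairwise d2.items
      have hmapperm : (pairs.map (fun p : Int × List Char => p.1)).Perm
          (d2.items.map (fun p : Int × List Char => p.1)) := hp0.map _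
      have hitemsnd : (d2.items.map (fun p : Int × List Char => p.1)).Nodup := by
        rw [hitems, List.map_map]
        have hcomp : ((fun p : Int × List Char => p.1)
            ∘ fun v => (v, sg (pvALPHABET.filter (fun c => f c == v)))) = fun v => v := rfl
        rw [hcomp, List.map_id']
        exact hnd1
      have hfstnd : (pairs.map (fun p : Int × List Char => p.1)).Nodup :=
        hmapperm.nodup_iff.mpr hitemsnd
      have hfstne : pairs.Pairwise (fun p q => p.1 ≠ q.1) := List.pairwise_map.mp hfstnd
      have hdesc : pairs.Pairwise (fun p q => q.1 < p.1) := by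
        refine (hpl.and hfstne).imp (fun {p q} h => ?_)
        obtain ⟨⟨hnlt, _⟩, hne⟩ := h
        omega
      refine hdesc.imp_of_mem (fun {p q} hp hq hlt => ?_)
      intro a ha b hb
      exact Or.inl (by rw [(hmemb p hp a ha).2, (hmemb q hq b hb).2]; exact hlt)

set_option maxHeartbeats 2000000 in
theorem get_english_frequency_match_spec : Claim_equal_get_english_frequency_match := by
  unfold Claim_equal_get_english_frequency_match Spec_get_english_frequency_match
  intro text _
  have hord := pv_ordered_eq text
  dsimp only at hord
  simp only [get_english_frequency_match, get_english_frequency_match_alt]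
  rw [hord]
  have hk : (fun c => (PySem.Chars.count text.toList [c] : Int))
      = fun c => ((text.toList.count c : Nat) : Int) := by
    funext c; rw [pv_count_singleton]
  rw [hk]
  rw [PySem.List.foldl_count_if, PySem.List.foldl_count_if,
    PySem.List.sum_map_ite_one_zero, PySem.List.sum_map_ite_one_zero]
  have hq1 : (fun letter => PySem.Chars.isIn [letter]
      (PySem.List.slice (PySem.List.sorted2 pvALPHABET
        (fun c => ((text.toList.count c : Nat) : Int))
        (fun c => PySem.Chars.find pvETAOIN [c]) true) none (some 6)))
      = fun letter => (PySem.List.slice (PySem.List.sorted2 pvALPHABET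
        (fun c => ((text.toList.count c : Nat) : Int))
        (fun c => PySem.Chars.find pvETAOIN [c]) true) none (some 6)).contains letter := by
    funext letter; rw [pv_isIn_singleton]
  have hq2 : (fun letter => PySem.Chars.isIn [letter]
      (PySem.List.slice (PySem.List.sorted2 pvALPHABET
        (fun c => ((text.toList.count c : Nat) : Int))
        (fun c => PySem.Chars.find pvETAOIN [c]) true) (some (-6)) none))
      = fun letter => (PySem.List.slice (PySem.List.sorted2 pvALPHABET
        (fun c => ((text.toList.count c : Nat) : Int))
        (fun c => PySem.Chars.find pvETAOIN [c]) true) (some (-6)) none).contains letter := by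
    funext letter; rw [pv_isIn_singleton]
  rw [hq1, hq2]
  ring
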